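-- pv_equiv track=rewrite | github.com/YUJIE47/Data-Compression | Task2_JPEG-like Compression/main.py | ConvertInt2Binary
-- ===== SOURCE A (Python) =====
-- def ConvertInt2Binary(ans):
--     tmp = abs(ans)
--     binaryString = "{0:b}".format(tmp)
--
--     if ans < 0 :
--         tmp = ''
--         for ch in binaryString:
--             if ch=='0':
--                 tmp+='1'
--             else:
--                 tmp+='0'
--         return tmp
--     else:
--         return binaryString
-- ===== SOURCE B (Python) =====
-- def ConvertInt2Binary(ans):
--     tmp = abs(ans)
--     binaryString = format(tmp, 'b')
--     if ans < 0:
--         b = len(binaryString)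
--         comp = (1 << b) - 1 - tmp
--         return format(comp, 'b').zfill(b)
--     return binaryString
-- ===== Notes on version B (the rewrite author's own statement) =====
-- stated objective: idiomatic
-- what changed: The negative branch's char-by-char flip loop over the binary string is replaced by a closed-form arithmetic one's-complement of tmp over b bits, formatted and zero-filled to the original width.
import Mathlib
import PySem

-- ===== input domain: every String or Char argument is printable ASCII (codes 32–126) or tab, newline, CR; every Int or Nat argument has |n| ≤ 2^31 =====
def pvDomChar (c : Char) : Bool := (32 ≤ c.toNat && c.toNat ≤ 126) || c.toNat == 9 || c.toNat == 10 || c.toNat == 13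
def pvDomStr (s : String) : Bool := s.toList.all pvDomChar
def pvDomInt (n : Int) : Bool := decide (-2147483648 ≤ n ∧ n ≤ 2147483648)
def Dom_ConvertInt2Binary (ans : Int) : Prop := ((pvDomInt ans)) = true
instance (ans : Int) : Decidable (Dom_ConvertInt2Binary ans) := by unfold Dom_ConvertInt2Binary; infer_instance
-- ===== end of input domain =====

-- B replaces A's char-by-char flip loop in the negative branch by a closed-form arithmetic
-- one's-complement of tmp over b bits, formatted and zero-filled to the original width (idiomatic).


-- ===== PORT A =====
def ConvertInt2Binary (ans : Int) : String :=
  let tmp : Int := |ans|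
  let binaryString : String := PySem.Int.toBin tmp
  if ans < 0 then
    -- tmp = ''; for ch in binaryString: tmp += '1' if ch=='0' else '0'
    String.ofList (binaryString.toList.foldl
      (fun acc ch => acc ++ [if ch = '0' then '1' else '0']) [])
  else
    binaryString

-- ===== PORT B =====
def ConvertInt2Binary_alt (ans : Int) : String :=
  let tmp : Int := |ans|
  let binaryString : String := PySem.Int.toBin tmp
  if ans < 0 then
    let b : Int := PySem.Str.len binaryString
    let comp : Int := ((1 : Int) <<< b.toNat) - 1 - tmp
    PySem.Str.zfill (PySem.Int.toBin comp) b
  else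
    binaryString

-- ===== PRECONDITION & SPEC =====
def Spec_ConvertInt2Binary (ans : Int) (out : String) : Prop := out = ConvertInt2Binary_alt ans
instance (ans : Int) (out : String) : Decidable (Spec_ConvertInt2Binary ans out) := by unfold Spec_ConvertInt2Binary; infer_instance

-- ===== CLAIM (what is proved, stated in full; the proofs are below) =====
def Claim_equal_ConvertInt2Binary : Prop := ∀ (ans : Int), Dom_ConvertInt2Binary ans → Spec_ConvertInt2Binary ans (ConvertInt2Binary ans)

-- ===== LEMMAS AND PROOFS =====
def bdig (n : Nat) : List Char :=
  if n < 2 then [Nat.digitChar n]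
  else bdig (n / 2) ++ [Nat.digitChar (n % 2)]
decreasing_by exact Nat.div_lt_self (by omega) (by omega)

lemma toDigitsCore_eq (f : Nat) : ∀ (n : Nat) (acc : List Char), n < f →
    Nat.toDigitsCore 2 f n acc = bdig n ++ acc := by
  induction f with
  | zero => intro n acc h; omega
  | succ f ih =>
    intro n acc h
    rw [Nat.toDigitsCore]
    by_cases h2 : n / 2 = 0
    · rw [if_pos h2, bdig, if_pos (by omega)]
      have hm : n % 2 = n := Nat.mod_eq_of_lt (by omega)
      simp [hm]
    · have hn2 : ¬ n < 2 := by omega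
      rw [if_neg h2, ih (n / 2) _ (by omega)]
      conv_rhs => rw [bdig, if_neg hn2]
      simp

lemma toDigits_two_eq (n : Nat) : Nat.toDigits 2 n = bdig n := by
  simpa [Nat.toDigits] using toDigitsCore_eq (n + 1) n [] (by omega)

def padBin (k : Nat) (n : Nat) : List Char :=
  match k with
  | 0 => []
  | k + 1 => padBin k (n / 2) ++ [Nat.digitChar (n % 2)]

lemma padBin_zero (k : Nat) : padBin k 0 = List.replicate k '0' := by
  induction k with
  | zero => rfl
  | succ k ih => rw [padBin, List.replicate_succ']; simp [ih]; rfl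

lemma bdig_lt (n : Nat) : n < 2 ^ (bdig n).length := by
  fun_induction bdig with
  | case1 n h => simpa using by omega
  | case2 n h ih =>
    simp only [List.length_append, List.length_singleton]
    have : 2 ^ ((bdig (n / 2)).length + 1) = 2 * 2 ^ (bdig (n / 2)).length := by ring
    omega

lemma bdig_len_pos (n : Nat) : 1 ≤ (bdig n).length := by
  rw [bdig]; split <;> simp

lemma padBin_eq (k n : Nat) (hk : 1 ≤ k) (hn : n < 2 ^ k) :
    padBin k n = List.replicate (k - (bdig n).length) '0' ++ bdig n := by
  induction k generalizing n with
  | zero => omega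
  | succ k ih =>
    by_cases h2 : n < 2
    · rw [padBin, bdig, if_pos h2]
      have h0 : n / 2 = 0 := by omega
      have hm : n % 2 = n := Nat.mod_eq_of_lt h2
      rw [h0, hm, padBin_zero]
      simp
    · have hk1 : 1 ≤ k := by
        by_contra hc
        have : k = 0 := by omega
        subst this; simp at hn; omega
      have hn2 : n / 2 < 2 ^ k := by
        have : 2 ^ (k + 1) = 2 * 2 ^ k := by ring
        omega
      rw [padBin, bdig, if_neg (by omega), ih (n / 2) hk1 hn2]
      have hlen : 1 ≤ (bdig (n / 2)).length := bdig_len_pos _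
      simp only [List.length_append, List.length_singleton, List.append_assoc]
      congr 2
      omega

def flipc (c : Char) : Char := if c = '0' then '1' else '0'

lemma flip_padBin (k : Nat) : ∀ n, n < 2 ^ k →
    (padBin k n).map flipc = padBin k (2 ^ k - 1 - n) := by
  induction k with
  | zero => intro n h; rfl
  | succ k ih =>
    intro n h
    have hP : 1 ≤ 2 ^ k := Nat.one_le_two_pow
    have hpow : 2 ^ (k + 1) = 2 * 2 ^ k := by ring
    rw [padBin, padBin, List.map_append, ih (n / 2) (by omega)]
    have hdiv : (2 ^ (k + 1) - 1 - n) / 2 = 2 ^ k - 1 - n / 2 := by omega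
    have hmod : (2 ^ (k + 1) - 1 - n) % 2 = 1 - n % 2 := by omega
    rw [hdiv, hmod]
    have : n % 2 = 0 ∨ n % 2 = 1 := by omega
    rcases this with h0 | h1
    · rw [h0]; congr 1
    · rw [h1]; congr 1

lemma bdig_chars (n : Nat) : ∀ c ∈ bdig n, c = '0' ∨ c = '1' := by
  fun_induction bdig with
  | case1 n h =>
    intro c hc
    interval_cases n <;> simp_all <;> decide
  | case2 n h ih =>
    intro c hc
    simp only [List.mem_append, List.mem_singleton] at hc
    rcases hc with hc | hc
    · exact ih c hc
    · have : n % 2 = 0 ∨ n % 2 = 1 := by omega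
      subst hc
      rcases this with h0 | h1
      · left; rw [h0]; decide
      · right; rw [h1]; decide

lemma zfill_bdig (m k : Nat) :
    PySem.Chars.zfill (bdig m) (k : Int) =
      List.replicate (k - (bdig m).length) '0' ++ bdig m := by
  cases hb : bdig m with
  | nil => have := bdig_len_pos m; rw [hb] at this; simp at this
  | cons c rest =>
    have hc : c = '0' ∨ c = '1' := bdig_chars m c (by rw [hb]; exact List.mem_cons_self ..)
    rw [PySem.Chars.zfill]
    by_cases hle : (k : Int) ≤ (c :: rest).length
    · rw [if_pos hle, Nat.sub_eq_zero_of_le (by exact_mod_cast hle)]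
      simp
    · rw [if_neg hle, if_neg (by rcases hc with h | h <;> subst h <;> decide)]
      have : ((k : Int)).toNat = k := Int.toNat_natCast k
      rw [this]

lemma foldl_flip (l acc : List Char) :
    l.foldl (fun acc ch => acc ++ [if ch = '0' then '1' else '0']) acc = acc ++ l.map flipc := by
  induction l generalizing acc with
  | nil => simp
  | cons c l ih => simp [List.foldl_cons, ih, flipc]

lemma main_eq (ans : Int) : ConvertInt2Binary ans = ConvertInt2Binary_alt ans := by
  unfold ConvertInt2Binary ConvertInt2Binary_alt
  by_cases hneg : ans < 0
  · simp only [if_pos hneg]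
    set n := ans.natAbs with hn
    have habs : |ans| = (n : Int) := Int.abs_eq_natAbs ans
    have htb : PySem.Int.toBinChars |ans| = bdig n := by
      rw [habs, PySem.Int.toBinChars, if_neg (by omega), Int.toNat_natCast, toDigits_two_eq]
    set k := (bdig n).length with hk
    have hk1 : 1 ≤ k := bdig_len_pos n
    have hlt : n < 2 ^ k := bdig_lt n
    have hL : (PySem.Int.toBin |ans|).toList = bdig n := by
      rw [PySem.Int.toList_toBin, htb]
    have hlen : PySem.Str.len (PySem.Int.toBin |ans|) = (k : Int) := by
      rw [PySem.Str.len, hL]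
    set m : Nat := 2 ^ k - 1 - n with hm
    have hmlt : m < 2 ^ k := by have := Nat.one_le_two_pow (n := k); omega
    have hcomp : ((1 : Int) <<< ((k : Int)).toNat) - 1 - |ans| = (m : Int) := by
      rw [Int.toNat_natCast, Int.shiftLeft_eq, habs]
      have h2 : ((2 ^ k : Nat) : Int) = (2 : Int) ^ k := by push_cast; ring
      have h3 : (m : Int) = ((2 ^ k : Nat) : Int) - 1 - (n : Int) := by omega
      rw [h3, h2]; ring
    have htbm : PySem.Int.toBinChars (m : Int) = bdig m := by
      rw [PySem.Int.toBinChars, if_neg (by omega), Int.toNat_natCast, toDigits_two_eq]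
    apply String.toList_inj.mp
    rw [String.toList_ofList, hL, foldl_flip, List.nil_append, hlen, hcomp,
      PySem.Str.toList_zfill, PySem.Int.toList_toBin, htbm, zfill_bdig]
    calc (bdig n).map flipc
        = (padBin k n).map flipc := by
          rw [padBin_eq k n hk1 hlt, ← hk, Nat.sub_self]; simp
      _ = padBin k m := flip_padBin k n hlt
      _ = List.replicate (k - (bdig m).length) '0' ++ bdig m := padBin_eq k m hk1 hmlt
  · simp only [if_neg hneg]

-- ===== VERDICT (by name: the statement is the Claim_ definition above) =====
theorem ConvertInt2Binary_spec : Claim_equal_ConvertInt2Binary := by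
  intro ans _
  unfold Spec_ConvertInt2Binary
  exact main_eq ans
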